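-- pv_equiv track=rewrite | github.com/ubcbraincircuits/pyDynamo | pydynamo-brain/files/idremap.py | _mergeSingleRemap
-- ===== SOURCE A (Python) =====
-- def _mergeSingleRemap(oldRemap, newRemap):
--     remap, inverseMap = [], {}
--     for pair in oldRemap:
--         remap.append(pair)
--
--     for fromID, newID in newRemap:
--         matchedOld = False
--         for i, pair in enumerate(remap):
--             if pair[1] == fromID:
--                 remap[i] = (pair[0], newID)
--                 matchedOld = True
--                 break
--         if not matchedOld:
--             remap.append((fromID, newID))
--     return remap
-- ===== SOURCE B (Python) =====
-- def _mergeSingleRemap(oldRemap, newRemap):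
--     remap = list(oldRemap)
--     # buckets: current target value -> ascending list of indices holding it
--     buckets = {}
--     for i, pair in enumerate(remap):
--         buckets.setdefault(pair[1], []).append(i)
--     for fromID, newID in newRemap:
--         idxs = buckets.get(fromID)
--         if idxs:
--             i = idxs.pop(0)
--             remap[i] = (remap[i][0], newID)
--         else:
--             i = len(remap)
--             remap.append((fromID, newID))
--         lst = buckets.setdefault(newID, [])
--         _insSorted(lst, i)
--     return remap
--
-- def _insSorted(lst, i):
--     for k in range(len(lst)):
--         if i < lst[k]:
--             lst.insert(k, i)
--             return
--     lst.append(i)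
-- ===== Notes on version B (the rewrite author's own statement) =====
-- stated objective: faster
-- what changed: Replaces A's per-pair linear scan of the accumulated remap with a dict from current target value to the ascending list of indices holding it, maintained incrementally, so each new pair touches only its own bucket instead of the whole list.
import Mathlib
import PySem

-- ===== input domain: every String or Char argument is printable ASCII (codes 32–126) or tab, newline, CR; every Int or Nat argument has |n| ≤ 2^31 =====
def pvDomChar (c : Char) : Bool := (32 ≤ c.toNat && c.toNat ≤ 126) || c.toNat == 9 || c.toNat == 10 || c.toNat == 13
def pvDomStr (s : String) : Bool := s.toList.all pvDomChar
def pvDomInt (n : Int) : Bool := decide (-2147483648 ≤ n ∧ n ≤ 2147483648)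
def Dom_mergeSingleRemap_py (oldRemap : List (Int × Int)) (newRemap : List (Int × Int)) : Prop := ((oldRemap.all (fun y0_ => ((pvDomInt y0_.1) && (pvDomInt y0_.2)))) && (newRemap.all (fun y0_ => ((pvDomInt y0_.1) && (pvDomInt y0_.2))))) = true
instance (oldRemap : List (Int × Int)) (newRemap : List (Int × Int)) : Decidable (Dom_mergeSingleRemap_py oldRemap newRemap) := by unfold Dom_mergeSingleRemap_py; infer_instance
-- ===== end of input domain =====

-- B replaces A's inner scan of the whole remap with per-target-value index buckets
-- kept in a dict, for an asymptotic speedup on distinct-target inputs. Return values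
-- are proved equal on all inputs; neither mutates its arguments observably.

-- ===== PORT A =====
-- inner loop of A: first pair with snd == fromID gets its snd replaced; none = no match
def pyFindReplace (remap : List (Int × Int)) (fromID newID : Int) : Option (List (Int × Int)) :=
  match remap with
  | [] => none
  | p :: rest =>
    if p.2 == fromID then some ((p.1, newID) :: rest)
    else match pyFindReplace rest fromID newID with
      | some r => some (p :: r)
      | none => none

def mergeSingleRemap_py (oldRemap : List (Int × Int)) (newRemap : List (Int × Int)) : List (Int × Int) :=
  let remap := oldRemap.foldl (fun acc p => acc ++ [p]) []
  newRemap.foldl (fun remap ft =>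
    match pyFindReplace remap ft.1 ft.2 with
    | some r => r
    | none => remap ++ [(ft.1, ft.2)]) remap

-- ===== PORT B =====
-- insert index i into an ascending bucket (Source B's _insSorted)
def insSorted : List Nat → Nat → List Nat
  | [], i => [i]
  | k :: rest, i => if i < k then i :: k :: rest else k :: insSorted rest i

-- initial buckets: target value ↦ ascending indices holding it (Source B's first loop)
def bInit (remap : List (Int × Int)) : Int → List Nat :=
  remap.zipIdx.foldl (fun b ip => Function.update b ip.1.2 (b ip.1.2 ++ [ip.2])) (fun _ => [])

-- one step of Source B's main loop on (remap, buckets)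
def bStep (st : List (Int × Int) × (Int → List Nat)) (ft : Int × Int) :
    List (Int × Int) × (Int → List Nat) :=
  match st.2 ft.1 with
  | i :: rest =>
    let remap' := st.1.set i ((st.1.getD i (0, 0)).1, ft.2)
    let b' := Function.update st.2 ft.1 rest
    (remap', Function.update b' ft.2 (insSorted (b' ft.2) i))
  | [] =>
    let i := st.1.length
    (st.1 ++ [(ft.1, ft.2)], Function.update st.2 ft.2 (insSorted (st.2 ft.2) i))

def mergeSingleRemap_py_alt (oldRemap : List (Int × Int)) (newRemap : List (Int × Int)) : List (Int × Int) :=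
  (newRemap.foldl bStep (oldRemap, bInit oldRemap)).1

-- ===== PRECONDITION & SPEC =====
def Spec_mergeSingleRemap_py (oldRemap : List (Int × Int)) (newRemap : List (Int × Int)) (out : List (Int × Int)) : Prop := out = mergeSingleRemap_py_alt oldRemap newRemap
instance (oldRemap : List (Int × Int)) (newRemap : List (Int × Int)) (out : List (Int × Int)) : Decidable (Spec_mergeSingleRemap_py oldRemap newRemap out) := by unfold Spec_mergeSingleRemap_py; infer_instance

-- ===== CLAIM (what is proved, stated in full; the proofs are below) =====
def Claim_equal_mergeSingleRemap_py : Prop := ∀ (oldRemap : List (Int × Int)) (newRemap : List (Int × Int)), Dom_mergeSingleRemap_py oldRemap newRemap → Spec_mergeSingleRemap_py oldRemap newRemap (mergeSingleRemap_py oldRemap newRemap)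

-- ===== LEMMAS AND PROOFS =====

-- ascending indices of pairs with snd = v
def idxsOf (v : Int) : List (Int × Int) → List Nat
  | [] => []
  | p :: rest => if p.2 = v then 0 :: (idxsOf v rest).map (· + 1) else (idxsOf v rest).map (· + 1)

theorem mem_idxsOf_lt (v : Int) (l : List (Int × Int)) (i : Nat) (h : i ∈ idxsOf v l) :
    i < l.length := by
  induction l generalizing i with
  | nil => simp [idxsOf] at h
  | cons p rest ih =>
    simp only [idxsOf] at h
    split at h
    · rcases List.mem_cons.mp h with h0 | h1
      · simp [h0]
      · rcases List.mem_map.mp h1 with ⟨j, hj, rfl⟩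
        have := ih j hj; simp; omega
    · rcases List.mem_map.mp h with ⟨j, hj, rfl⟩
      have := ih j hj; simp; omega

theorem mem_idxsOf_snd (v : Int) (l : List (Int × Int)) (i : Nat) (d : Int × Int)
    (h : i ∈ idxsOf v l) : (l.getD i d).2 = v := by
  induction l generalizing i with
  | nil => simp [idxsOf] at h
  | cons p rest ih =>
    simp only [idxsOf] at h
    split at h
    · rcases List.mem_cons.mp h with h0 | h1
      · subst h0; simpa using (by assumption : p.2 = v)
      · rcases List.mem_map.mp h1 with ⟨j, hj, rfl⟩
        simpa [List.getD_cons_succ] using ih j hj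
    · rcases List.mem_map.mp h with ⟨j, hj, rfl⟩
      simpa [List.getD_cons_succ] using ih j hj

theorem pairwise_idxsOf (v : Int) (l : List (Int × Int)) : (idxsOf v l).Pairwise (· < ·) := by
  induction l with
  | nil => simp [idxsOf]
  | cons p rest ih =>
    have hmap : ((idxsOf v rest).map (· + 1)).Pairwise (· < ·) :=
      List.pairwise_map.mpr (ih.imp (by omega))
    simp only [idxsOf]
    split
    · exact List.Pairwise.cons (by intro x hx; rcases List.mem_map.mp hx with ⟨j, _, rfl⟩; omega) hmap
    · exact hmap

theorem find_none (l : List (Int × Int)) (f t : Int) (h : idxsOf f l = []) :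
    pyFindReplace l f t = none := by
  induction l with
  | nil => rfl
  | cons p rest ih =>
    simp only [idxsOf] at h
    split at h
    · exact absurd h (by simp)
    · simp only [pyFindReplace]
      rw [if_neg (by simpa using (by assumption : ¬ p.2 = f))]
      rw [ih (List.map_eq_nil_iff.mp h)]

theorem find_cons (l : List (Int × Int)) (f t : Int) (i : Nat) (rest : List Nat)
    (h : idxsOf f l = i :: rest) :
    pyFindReplace l f t = some (l.set i ((l.getD i (0, 0)).1, t)) := by
  induction l generalizing i rest with
  | nil => simp [idxsOf] at h
  | cons p tl ih =>
    simp only [idxsOf] at h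
    by_cases hp : p.2 = f
    · rw [if_pos hp] at h
      injection h with h1 h2
      subst h1
      simp [pyFindReplace, hp]
    · rw [if_neg hp] at h
      cases hE : idxsOf f tl with
      | nil => rw [hE] at h; simp at h
      | cons j tl2 =>
        rw [hE] at h
        simp only [List.map_cons] at h
        injection h with h1 h2
        subst h1
        simp only [pyFindReplace]
        rw [if_neg (by simpa using hp)]
        rw [ih j tl2 hE]
        simp

theorem insSorted_big (l : List Nat) (i : Nat) (h : ∀ j ∈ l, j < i) : insSorted l i = l ++ [i] := by
  induction l with
  | nil => rfl
  | cons k tl ih =>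
    have hk : k < i := h k (by simp)
    simp only [insSorted]
    rw [if_neg (by omega)]
    rw [ih (fun j hj => h j (by simp [hj]))]
    simp

theorem insSorted_small (l : List Nat) (i : Nat) (h : ∀ j ∈ l, i < j) : insSorted l i = i :: l := by
  cases l with
  | nil => rfl
  | cons k tl =>
    simp only [insSorted]
    rw [if_pos (h k (by simp))]

theorem insSorted_map_succ (l : List Nat) (i : Nat) :
    insSorted (l.map (· + 1)) (i + 1) = (insSorted l i).map (· + 1) := by
  induction l with
  | nil => rfl
  | cons k tl ih =>
    simp only [List.map_cons, insSorted]
    by_cases hik : i < k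
    · rw [if_pos (by omega), if_pos hik]; simp
    · rw [if_neg (by omega), if_neg hik]
      simp [ih]

theorem insSorted_map_zero (l : List Nat) :
    insSorted (l.map (· + 1)) 0 = 0 :: l.map (· + 1) := by
  cases l with
  | nil => rfl
  | cons k tl => simp [insSorted]

theorem filter_map_succ (L : List Nat) (j : Nat) :
    (L.map (· + 1)).filter (fun k => k ≠ (j + 1)) = (L.filter (fun k => k ≠ j)).map (· + 1) := by
  induction L with
  | nil => rfl
  | cons a tl ih =>
    simp only [List.map_cons, List.filter_cons]
    by_cases haj : a = j
    · subst haj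
      rw [if_neg (by simp), if_neg (by simp)]
      simpa using ih
    · rw [if_pos (by simp; omega), if_pos (by simp [haj])]
      rw [List.map_cons]
      refine congrArg (List.cons (a + 1)) ?_
      simpa using ih

theorem idxsOf_set_ne (l : List (Int × Int)) (i : Nat) (x f t v : Int)
    (hi : i < l.length) (hf : (l.getD i (0, 0)).2 = f) (hvf : v ≠ f) (hvt : v ≠ t) :
    idxsOf v (l.set i (x, t)) = idxsOf v l := by
  induction l generalizing i with
  | nil => simp at hi
  | cons p tl ih =>
    cases i with
    | zero =>
      have hp : p.2 = f := by simpa using hf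
      simp only [List.set_cons_zero, idxsOf]
      rw [if_neg (fun hh => hvt (by simpa using hh.symm)),
        if_neg (fun hh => hvf (by rw [hp] at hh; exact hh.symm))]
    | succ j =>
      simp only [List.set_cons_succ, idxsOf]
      rw [ih j (by simpa using hi) (by simpa [List.getD_cons_succ] using hf)]

theorem idxsOf_set_old (l : List (Int × Int)) (i : Nat) (x f t : Int)
    (hi : i < l.length) (hft : f ≠ t) :
    idxsOf f (l.set i (x, t)) = (idxsOf f l).filter (fun j => j ≠ i) := by
  induction l generalizing i with
  | nil => simp at hi
  | cons p tl ih =>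
    cases i with
    | zero =>
      simp only [List.set_cons_zero, idxsOf]
      rw [if_neg (fun hh => hft (by simpa using hh.symm))]
      by_cases hp : p.2 = f
      · rw [if_pos hp, List.filter_cons]
        rw [if_neg (by simp)]
        rw [List.filter_eq_self.mpr (by intro a ha; rcases List.mem_map.mp ha with ⟨j, _, rfl⟩; simp)]
      · rw [if_neg hp]
        rw [List.filter_eq_self.mpr (by intro a ha; rcases List.mem_map.mp ha with ⟨j, _, rfl⟩; simp)]
    | succ j =>
      simp only [List.set_cons_succ, idxsOf]
      rw [ih j (by simpa using hi)]
      by_cases hp : p.2 = f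
      · rw [if_pos hp, if_pos hp, List.filter_cons, if_pos (by simp), filter_map_succ]
      · rw [if_neg hp, if_neg hp, filter_map_succ]

theorem idxsOf_set_new (l : List (Int × Int)) (i : Nat) (x t : Int)
    (hi : i < l.length) (ht : (l.getD i (0, 0)).2 ≠ t) :
    idxsOf t (l.set i (x, t)) = insSorted (idxsOf t l) i := by
  induction l generalizing i with
  | nil => simp at hi
  | cons p tl ih =>
    cases i with
    | zero =>
      have hp : ¬ p.2 = t := by simpa using ht
      simp only [List.set_cons_zero, idxsOf]
      rw [if_true, if_neg hp, insSorted_map_zero]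
    | succ j =>
      simp only [List.set_cons_succ, idxsOf]
      rw [ih j (by simpa using hi) (by simpa [List.getD_cons_succ] using ht)]
      by_cases hp : p.2 = t
      · rw [if_pos hp, if_pos hp]
        simp only [insSorted]
        rw [if_neg (by omega), insSorted_map_succ]
      · rw [if_neg hp, if_neg hp, insSorted_map_succ]

theorem idxsOf_append (l : List (Int × Int)) (f t v : Int) :
    idxsOf v (l ++ [(f, t)]) = idxsOf v l ++ (if t = v then [l.length] else []) := by
  induction l with
  | nil =>
    simp only [List.nil_append, idxsOf, List.length_nil]
    split <;> simp
  | cons p tl ih =>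
    simp only [List.cons_append, idxsOf, ih, List.length_cons, List.map_append]
    by_cases hp : p.2 = v
    · rw [if_pos hp, if_pos hp]
      split <;> simp
    · rw [if_neg hp, if_neg hp]
      split <;> simp

theorem bInit_aux (l : List (Int × Int)) (k : Nat) (b : Int → List Nat) (v : Int) :
    ((l.zipIdx k).foldl (fun (b : Int → List Nat) (ip : (Int × Int) × Nat) => Function.update b ip.1.2 (b ip.1.2 ++ [ip.2])) b) v
      = b v ++ (idxsOf v l).map (· + k) := by
  induction l generalizing k b with
  | nil => simp [idxsOf]
  | cons p tl ih =>
    rw [List.zipIdx_cons, List.foldl_cons, ih]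
    have hmm : ∀ L : List Nat, (L.map (· + 1)).map (· + k) = L.map (· + (k + 1)) := by
      intro L
      rw [List.map_map]
      exact List.map_congr_left (fun a _ => by simp; omega)
    simp only [idxsOf]
    by_cases hp : p.2 = v
    · rw [if_pos hp, Function.update_apply, if_pos hp.symm, List.map_cons, hmm, hp]
      simp
    · rw [if_neg hp, Function.update_apply, if_neg (fun hh => hp hh.symm), hmm]

theorem bInit_eq (l : List (Int × Int)) (v : Int) : bInit l v = idxsOf v l := by
  unfold bInit
  rw [bInit_aux]
  simp

theorem foldl_append_id (l : List (Int × Int)) :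
    l.foldl (fun acc p => acc ++ [p]) [] = l := by
  have aux : ∀ (l acc : List (Int × Int)), l.foldl (fun acc p => acc ++ [p]) acc = acc ++ l := by
    intro l
    induction l with
    | nil => simp
    | cons p tl ih => intro acc; simp [ih]
  simpa using aux l []

theorem set_getD_self (l : List (Int × Int)) (i : Nat) (d : Int × Int) (hi : i < l.length) :
    l.set i (l.getD i d) = l := by
  induction l generalizing i with
  | nil => simp at hi
  | cons p tl ih =>
    cases i with
    | zero => simp
    | succ j => rw [List.getD_cons_succ, List.set_cons_succ, ih j (by simpa using hi)]

-- the loop invariant: buckets = idxsOf, and one step of B equals one step of A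
theorem step_lemma (remap : List (Int × Int)) (b : Int → List Nat) (ft : Int × Int)
    (hInv : ∀ v, b v = idxsOf v remap) :
    (bStep (remap, b) ft).1 = (match pyFindReplace remap ft.1 ft.2 with
      | some r => r
      | none => remap ++ [(ft.1, ft.2)]) ∧
    (∀ v, (bStep (remap, b) ft).2 v = idxsOf v ((bStep (remap, b) ft).1)) := by
  obtain ⟨f, t⟩ := ft
  cases hb : b f with
  | nil =>
    have hI : idxsOf f remap = [] := by rw [← hInv]; exact hb
    refine ⟨?_, ?_⟩
    · simp only [bStep, hb, find_none remap f t hI]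
    · intro v
      simp only [bStep, hb]
      rw [idxsOf_append, Function.update_apply]
      by_cases hv : v = t
      · subst hv
        rw [if_pos rfl, hInv, insSorted_big _ _ (fun j hj => mem_idxsOf_lt _ _ _ hj), if_pos rfl]
      · rw [if_neg hv, if_neg (fun hh => hv hh.symm), hInv]
        simp
  | cons i rest =>
    have hI : idxsOf f remap = i :: rest := by rw [← hInv]; exact hb
    have hmem : i ∈ idxsOf f remap := by rw [hI]; exact List.mem_cons_self ..
    have hilen : i < remap.length := mem_idxsOf_lt _ _ _ hmem
    have hsnd : (remap.getD i (0, 0)).2 = f := mem_idxsOf_snd _ _ _ _ hmem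
    have hrest : ∀ j ∈ rest, i < j := by
      have hpw := pairwise_idxsOf f remap
      rw [hI] at hpw
      exact (List.pairwise_cons.mp hpw).1
    refine ⟨?_, ?_⟩
    · simp only [bStep, hb, find_cons remap f t i rest hI]
    · intro v
      simp only [bStep, hb]
      by_cases hft : f = t
      · subst hft
        have hval : ((remap.getD i (0, 0)).1, f) = remap.getD i (0, 0) := by
          conv_rhs => rw [← Prod.mk.eta (p := remap.getD i (0, 0))]
          rw [hsnd]
        rw [hval, set_getD_self _ _ _ hilen]
        have h1 : (Function.update b f rest) f = rest := by simp
        rw [h1, insSorted_small rest i hrest, Function.update_idem]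
        have h2 : i :: rest = b f := by rw [hb]
        rw [h2, Function.update_eq_self, hInv]
      · have hbt : (Function.update b f rest) t = idxsOf t remap := by
          rw [Function.update_apply, if_neg (fun hh => hft hh.symm), hInv]
        rw [Function.update_apply, hbt]
        by_cases hvt : v = t
        · subst hvt
          rw [if_pos rfl, idxsOf_set_new _ _ _ _ hilen (by rw [hsnd]; exact hft)]
        · rw [if_neg hvt, Function.update_apply]
          by_cases hvf : v = f
          · subst hvf
            rw [if_pos rfl, idxsOf_set_old _ _ _ _ _ hilen hft, hI, List.filter_cons,
              if_neg (by simp)]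
            rw [List.filter_eq_self.mpr (fun j hj => by
              have := hrest j hj; simp; omega)]
          · rw [if_neg hvf, hInv, idxsOf_set_ne _ _ _ f _ _ hilen hsnd hvf hvt]

theorem main_lemma (newRemap : List (Int × Int)) (remap : List (Int × Int)) (b : Int → List Nat)
    (hInv : ∀ v, b v = idxsOf v remap) :
    (newRemap.foldl bStep (remap, b)).1 =
      newRemap.foldl (fun remap ft =>
        match pyFindReplace remap ft.1 ft.2 with
        | some r => r
        | none => remap ++ [(ft.1, ft.2)]) remap := by
  induction newRemap generalizing remap b with
  | nil => rfl
  | cons ft tl ih =>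
    rw [List.foldl_cons, List.foldl_cons]
    obtain ⟨h1, h2⟩ := step_lemma remap b ft hInv
    rw [← h1]
    exact ih (bStep (remap, b) ft).1 (bStep (remap, b) ft).2 h2

-- ===== VERDICT (by name: the statement is the Claim_ definition above) =====
theorem mergeSingleRemap_py_spec : Claim_equal_mergeSingleRemap_py := by
  intro oldRemap newRemap _
  unfold Spec_mergeSingleRemap_py mergeSingleRemap_py mergeSingleRemap_py_alt
  rw [foldl_append_id]
  exact (main_lemma newRemap oldRemap (bInit oldRemap) (fun v => bInit_eq oldRemap v)).symm
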